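-- pv_equiv track=rewrite | github.com/shawinsoranakom/CodeSnippets | CollectedSnippets/TrainingDataset/Snip0144.py | largest_pow_of_two_le_num
-- ===== SOURCE A (Python) =====
-- def largest_pow_of_two_le_num(number: int) -> int:
--
--     if isinstance(number, float):
--         raise TypeError("Input value must be a 'int' type")
--     if number <= 0:
--         return 0
--     res = 1
--     while (res << 1) <= number:
--         res <<= 1
--     return res
-- ===== SOURCE B (Python) =====
-- def largest_pow_of_two_le_num(number: int) -> int:
--     if isinstance(number, float):
--         raise TypeError("Input value must be a 'int' type")
--     if number <= 0:
--         return 0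
--     return 1 << (number.bit_length() - 1)
-- ===== Notes on version B (the rewrite author's own statement) =====
-- stated objective: idiomatic
-- what changed: The doubling while-loop is replaced by a closed form: one left-shifted by the input's bit length minus one; both guards of A are kept verbatim.
import Mathlib
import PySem

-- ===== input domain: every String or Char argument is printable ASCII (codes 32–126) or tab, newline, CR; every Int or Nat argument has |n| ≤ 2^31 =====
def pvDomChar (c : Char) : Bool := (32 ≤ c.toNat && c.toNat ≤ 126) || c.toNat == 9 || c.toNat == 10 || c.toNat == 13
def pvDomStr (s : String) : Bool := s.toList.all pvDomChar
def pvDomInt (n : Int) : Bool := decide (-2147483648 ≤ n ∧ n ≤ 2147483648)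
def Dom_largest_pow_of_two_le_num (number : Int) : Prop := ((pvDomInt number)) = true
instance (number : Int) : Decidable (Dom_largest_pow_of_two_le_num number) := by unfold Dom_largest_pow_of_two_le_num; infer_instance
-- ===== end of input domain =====

-- B replaces A's doubling while-loop by the closed form 1 << (bit_length - 1) (idiomatic; same guards).


-- ===== PORT A =====
-- the `while (res << 1) <= number: res <<= 1` loop; `res << 1` is `res * 2` (exact on ints).
-- fuel (number.toNat) only makes the recursion total; it is large enough that the loop
-- always exits via its own condition.
def pvLoopA (number : Int) : Nat → Int → Int
  | 0, res => res
  | fuel + 1, res => if res * 2 ≤ number then pvLoopA number fuel (res * 2) else res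

-- A's float guard cannot fire for an Int argument; it is not representable here.
def largest_pow_of_two_le_num (number : Int) : Int :=
  if number ≤ 0 then 0
  else pvLoopA number number.toNat 1

-- ===== PORT B =====
-- `number.bit_length()` for number > 0 is Nat.log2 number.toNat + 1 (exact);
-- `1 << (bit_length - 1)` is 2 ^ (bit_length - 1).
def largest_pow_of_two_le_num_alt (number : Int) : Int :=
  if number ≤ 0 then 0
  else (2 : Int) ^ ((Nat.log2 number.toNat + 1) - 1)

-- ===== PRECONDITION & SPEC =====
def Spec_largest_pow_of_two_le_num (number : Int) (out : Int) : Prop := out = largest_pow_of_two_le_num_alt number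
instance (number : Int) (out : Int) : Decidable (Spec_largest_pow_of_two_le_num number out) := by unfold Spec_largest_pow_of_two_le_num; infer_instance

-- ===== CLAIM (what is proved, stated in full; the proofs are below) =====
def Claim_equal_largest_pow_of_two_le_num : Prop := ∀ (number : Int), Dom_largest_pow_of_two_le_num number → Spec_largest_pow_of_two_le_num number (largest_pow_of_two_le_num number)

-- ===== LEMMAS AND PROOFS =====

-- Loop invariant: starting from res = 2^k with 2^k ≤ number and enough fuel,
-- the loop returns 2^(log2 number).
theorem pvLoopA_eq (number : Int) (fuel : Nat) : ∀ (k : Nat),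
    (2 : Int) ^ k ≤ number → number < 2 ^ (k + fuel) →
    pvLoopA number fuel ((2 : Int) ^ k) = 2 ^ (Nat.log2 number.toNat) := by
  induction fuel with
  | zero => intro k h1 h2; simp at h2; omega
  | succ fuel ih =>
    intro k h1 h2
    rw [pvLoopA]
    split_ifs with h
    · have : (2 : Int) ^ k * 2 = 2 ^ (k + 1) := by ring
      rw [this]
      exact ih (k + 1) (this ▸ h) (by have : k + 1 + fuel = k + (fuel + 1) := by omega
                                      rw [this]; exact h2)
    · -- loop exits: 2^k ≤ number < 2^(k+1), so log2 number.toNat = k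
      push_neg at h
      have hpos : (0 : Int) < number := lt_of_lt_of_le (by positivity) h1
      have hn : number = (number.toNat : Int) := by omega
      have h1' : 2 ^ k ≤ number.toNat := by
        have := h1; rw [hn] at this; exact_mod_cast this
      have h2' : number.toNat < 2 ^ (k + 1) := by
        have : number < (2 : Int) ^ (k + 1) := by
          have : (2 : Int) ^ k * 2 = 2 ^ (k + 1) := by ring
          omega
        rw [hn] at this; exact_mod_cast this
      have hlog : Nat.log2 number.toNat = k := by
        rw [Nat.log2_eq_log_two]; exact Nat.log_eq_of_pow_le_of_lt_pow h1' h2'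
      rw [hlog]

-- ===== VERDICT (by name: the statement is the Claim_ definition above) =====
theorem largest_pow_of_two_le_num_spec : Claim_equal_largest_pow_of_two_le_num := by
  intro number _
  unfold Spec_largest_pow_of_two_le_num largest_pow_of_two_le_num largest_pow_of_two_le_num_alt
  split_ifs with h
  · rfl
  · push_neg at h
    have h1 : (2 : Int) ^ 0 ≤ number := by simpa using h
    have key : (number.toNat : Int) < (2 : Int) ^ number.toNat := by
      exact_mod_cast Nat.lt_two_pow_self (n := number.toNat)
    have h2 : number < 2 ^ (0 + number.toNat) := by
      simp only [Nat.zero_add]; omega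
    have := pvLoopA_eq number number.toNat 0 h1 h2
    simpa using this
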